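-- pv_equiv track=rewrite | github.com/tas12740/Bracket-Project | sportsrefdata/sportsrefcleaner.py | is_playerbasicdata
-- ===== SOURCE A (Python) =====
-- def is_match(row, keys, keys_match):
--     for key in keys_match:
--         if key not in keys:
--             return False
--     return len(keys) == len(keys_match)
--
-- def is_playerbasicdata(row):
--     keys = list(row.keys())
--     keys_matches = []
--     keys_matches.append(['number', 'year', 'type', 'class', 'pos', 'height', 'weight', 'hometown', 'summary', 'player'])
--     keys_matches.append(['number', 'year', 'type', 'class', 'pos', 'height', 'weight', 'rsci', 'summary', 'player'])
--     keys_matches.append(['number', 'year', 'type', 'class', 'pos', 'height', 'weight', 'summary', 'player'])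
--     keys_matches.append(['number', 'year', 'type', 'class', 'height', 'weight', 'hometown', 'summary', 'player'])
--     keys_matches.append(['class', 'year', 'type', 'pos', 'height', 'weight', 'summary', 'player'])
--     keys_matches.append(['number', 'year', 'type', 'class', 'weight', 'hometown', 'summary', 'player'])
--     keys_matches.append(['class', 'year', 'type', 'pos', 'high_school', 'summary', 'player'])
--     keys_matches.append(['number', 'year', 'type', 'pos', 'height', 'weight', 'hometown', 'high_school', 'summary', 'player'])
--     keys_matches.append(['number', 'year', 'type', 'pos', 'height', 'weight', 'hometown', 'summary', 'player'])
--     keys_matches.append(['number', 'year', 'type', 'class', 'pos', 'height', 'weight', 'hometown', 'rsci', 'summary', 'player'])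
--     keys_matches.append(['number', 'year', 'type', 'class', 'pos', 'weight', 'hometown', 'summary', 'player'])
--     keys_matches.append(['number', 'year', 'type', 'class', 'pos', 'height', 'weight', 'hometown', 'high_school', 'summary', 'player'])
--     for poss in keys_matches:
--         res = is_match(row, keys, poss)
--         if res:
--             return res
--     return False
-- ===== SOURCE B (Python) =====
-- # Each known key gets one bit; a row matches a template iff the OR of its key
-- # bits (with every key known) equals that template's precomputed bitmask.
-- _KEY_BIT = {'number': 1, 'year': 2, 'type': 4, 'class': 8, 'pos': 16,
--             'height': 32, 'weight': 64, 'hometown': 128, 'rsci': 256,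
--             'summary': 512, 'player': 1024, 'high_school': 2048}
--
-- _TEMPLATE_MASKS = (1791, 1919, 1663, 1775, 1662, 1743, 3614, 3831, 1783, 2047, 1759, 3839)
--
--
-- def is_playerbasicdata(row):
--     mask = 0
--     for key in row.keys():
--         bit = _KEY_BIT.get(key)
--         if bit is None:
--             return False
--         mask |= bit
--     return mask in _TEMPLATE_MASKS
-- ===== Notes on version B (the rewrite author's own statement) =====
-- stated objective: alternative
-- what changed: A's loop over 12 templates with an inner per-key membership scan plus a length check is replaced by encoding each known key as a distinct bit, OR-ing the row's key bits in one pass (bailing out on any unknown key), and looking the resulting bitmask up among 12 precomputed template masks.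
import Mathlib
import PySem

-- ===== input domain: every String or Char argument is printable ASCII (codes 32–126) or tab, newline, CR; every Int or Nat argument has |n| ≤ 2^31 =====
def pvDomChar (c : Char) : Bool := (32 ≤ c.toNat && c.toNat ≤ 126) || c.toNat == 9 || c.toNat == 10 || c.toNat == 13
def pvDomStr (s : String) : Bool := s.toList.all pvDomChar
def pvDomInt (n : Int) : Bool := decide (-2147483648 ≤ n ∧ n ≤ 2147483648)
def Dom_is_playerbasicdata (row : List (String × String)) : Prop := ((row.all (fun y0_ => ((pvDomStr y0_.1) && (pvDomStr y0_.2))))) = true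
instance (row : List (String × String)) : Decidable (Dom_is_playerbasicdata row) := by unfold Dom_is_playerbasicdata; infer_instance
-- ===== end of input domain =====

-- B replaces A's loop over 12 templates with an inner per-key scan by one pass that ORs a
-- distinct bit per known key into a mask and looks the mask up among 12 precomputed masks.

-- ===== PORT A =====
-- helper is_match: the 'for key in keys_match' loop with early return False,
-- then 'len(keys) == len(keys_match)'; 'full' carries the whole keys_match for the final length test
def pvIsMatchGo (keys full : List String) : List String → Bool
  | [] => keys.length == full.length
  | key :: rest => if !(keys.contains key) then false else pvIsMatchGo keys full rest

def pv_is_match (keys keys_match : List String) : Bool :=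
  pvIsMatchGo keys keys_match keys_match

-- the 'for poss in keys_matches' loop: return res as soon as it is truthy, else False
def pvTemplLoop (keys : List String) : List (List String) → Bool
  | [] => false
  | poss :: rest =>
      let res := pv_is_match keys poss
      if res then res else pvTemplLoop keys rest

def pvKeysMatches : List (List String) :=
  [ ["number", "year", "type", "class", "pos", "height", "weight", "hometown", "summary", "player"]
  , ["number", "year", "type", "class", "pos", "height", "weight", "rsci", "summary", "player"]
  , ["number", "year", "type", "class", "pos", "height", "weight", "summary", "player"]
  , ["number", "year", "type", "class", "height", "weight", "hometown", "summary", "player"]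
  , ["class", "year", "type", "pos", "height", "weight", "summary", "player"]
  , ["number", "year", "type", "class", "weight", "hometown", "summary", "player"]
  , ["class", "year", "type", "pos", "high_school", "summary", "player"]
  , ["number", "year", "type", "pos", "height", "weight", "hometown", "high_school", "summary", "player"]
  , ["number", "year", "type", "pos", "height", "weight", "hometown", "summary", "player"]
  , ["number", "year", "type", "class", "pos", "height", "weight", "hometown", "rsci", "summary", "player"]
  , ["number", "year", "type", "class", "pos", "weight", "hometown", "summary", "player"]
  , ["number", "year", "type", "class", "pos", "height", "weight", "hometown", "high_school", "summary", "player"] ]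

def is_playerbasicdata (row : List (String × String)) : Bool :=
  let keys := (PySem.Dict.ofList row).keys
  pvTemplLoop keys pvKeysMatches

-- ===== PORT B =====
-- _KEY_BIT: one distinct power-of-two bit per known key
def pvKeyBit : List (String × Nat) :=
  [ ("number", 1), ("year", 2), ("type", 4), ("class", 8), ("pos", 16)
  , ("height", 32), ("weight", 64), ("hometown", 128), ("rsci", 256)
  , ("summary", 512), ("player", 1024), ("high_school", 2048) ]

-- _TEMPLATE_MASKS, precomputed
def pvTemplateMasks : List Nat :=
  [1791, 1919, 1663, 1775, 1662, 1743, 3614, 3831, 1783, 2047, 1759, 3839]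

-- the 'for key in row.keys()' loop: OR bits into mask, early return False on an unknown key
def pvMaskGo (mask : Nat) : List String → Option Nat
  | [] => some mask
  | key :: rest =>
      match pvKeyBit.lookup key with
      | none => none
      | some bit => pvMaskGo (mask ||| bit) rest

def is_playerbasicdata_alt (row : List (String × String)) : Bool :=
  match pvMaskGo 0 (PySem.Dict.ofList row).keys with
  | none => false
  | some mask => pvTemplateMasks.contains mask

-- ===== PRECONDITION & SPEC =====
def Spec_is_playerbasicdata (row : List (String × String)) (out : Bool) : Prop := out = is_playerbasicdata_alt row
instance (row : List (String × String)) (out : Bool) : Decidable (Spec_is_playerbasicdata row out) := by unfold Spec_is_playerbasicdata; infer_instance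

-- ===== CLAIM (what is proved, stated in full; the proofs are below) =====
def Claim_equal_is_playerbasicdata : Prop := ∀ (row : List (String × String)), Dom_is_playerbasicdata row → Spec_is_playerbasicdata row (is_playerbasicdata row)

-- ===== LEMMAS AND PROOFS =====

-- proof-only abbreviations
def pvBit (k : String) : Nat := (pvKeyBit.lookup k).getD 0
def pvVocab : List String := pvKeyBit.map Prod.fst
def pvMaskOf (l : List String) : Nat := l.foldl (fun m k => m ||| pvBit k) 0

-- the keys of dict(row) are exactly set(row.map fst) (first occurrences, in order)
theorem pv_keys_ofList (row : List (String × String)) :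
    (PySem.Dict.ofList row).keys = PySem.Set.ofList (row.map Prod.fst) := by
  have h := PySem.Dict.keys_foldl_insert_key (l := row) (key := Prod.fst)
    (f := fun _ p => p.2) (d := PySem.Dict.empty)
  simpa [PySem.Dict.ofList, PySem.Set.update_nil_left, PySem.Dict.keys_empty] using h

-- the is_match inner loop is 'all keys present' && the final length test
theorem pvIsMatchGo_eq (keys full l : List String) :
    pvIsMatchGo keys full l = (l.all keys.contains && (keys.length == full.length)) := by
  induction l with
  | nil => simp [pvIsMatchGo]
  | cons k rest ih =>
      simp only [pvIsMatchGo, List.all_cons, ih]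
      by_cases h : k ∈ keys
      · simp [h]
      · simp [h]

-- for duplicate-free lists, is_match is exactly same-membership
theorem pv_is_match_iff (keys tmpl : List String)
    (hk : keys.Nodup) (ht : tmpl.Nodup) :
    pv_is_match keys tmpl = true ↔ (∀ x, x ∈ keys ↔ x ∈ tmpl) := by
  rw [pv_is_match, pvIsMatchGo_eq]
  simp only [Bool.and_eq_true, List.all_eq_true, List.contains_iff_mem, beq_iff_eq]
  constructor
  · rintro ⟨hall, hlen⟩
    have hsub : tmpl.toFinset ⊆ keys.toFinset := by
      intro x hx
      simp only [List.mem_toFinset] at hx ⊢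
      exact hall x hx
    have hcard : keys.toFinset.card ≤ tmpl.toFinset.card := by
      rw [List.toFinset_card_of_nodup hk, List.toFinset_card_of_nodup ht]; omega
    have heq : tmpl.toFinset = keys.toFinset := Finset.eq_of_subset_of_card_le hsub hcard
    intro x
    constructor
    · intro hx
      exact List.mem_toFinset.mp (heq ▸ List.mem_toFinset.mpr hx)
    · intro hx
      exact List.mem_toFinset.mp (heq ▸ List.mem_toFinset.mpr hx)
  · intro hm
    have hperm : keys.Perm tmpl := (List.perm_ext_iff_of_nodup hk ht).mpr hm
    exact ⟨fun x hx => (hm x).mpr hx, hperm.length_eq⟩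

-- the template loop of A computes 'some template matches'
theorem pvTemplLoop_eq_any (keys : List String) (ts : List (List String)) :
    pvTemplLoop keys ts = ts.any (pv_is_match keys) := by
  induction ts with
  | nil => simp [pvTemplLoop]
  | cons t rest ih =>
      by_cases h : pv_is_match keys t = true <;> simp [pvTemplLoop, h, ih]

-- each of A's literal templates is duplicate-free and made of known keys
theorem pv_templates_nodup : ∀ t ∈ pvKeysMatches, t.Nodup := by decide
theorem pv_templates_vocab : ∀ t ∈ pvKeysMatches, ∀ k ∈ t, k ∈ pvVocab := by decide

-- B's mask table is the mask of each of A's templates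
theorem pv_masks_map : pvKeysMatches.map (fun t => pvMaskGo 0 t) = pvTemplateMasks.map some := by decide

-- the distinct bits separate the vocabulary
theorem pv_bit_self : ∀ k ∈ pvVocab, (pvBit k).testBit (Nat.log2 (pvBit k)) = true := by decide
theorem pv_bit_inj : ∀ k ∈ pvVocab, ∀ k' ∈ pvVocab,
    (pvBit k').testBit (Nat.log2 (pvBit k)) = true → k' = k := by decide
theorem pv_lookup_mem (k : String) (l : List (String × Nat)) :
    (l.lookup k).isSome = true ↔ k ∈ l.map Prod.fst := by
  induction l with
  | nil => simp [List.lookup]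
  | cons p rest ih =>
      obtain ⟨a, b⟩ := p
      by_cases h : a = k
      · subst h; simp [List.lookup]
      · have hne : k ≠ a := Ne.symm h
        have hb : (k == a) = false := beq_eq_false_iff_ne.mpr hne
        simp [List.lookup, hb, ih, hne]

theorem pv_lookup_vocab (k : String) : (pvKeyBit.lookup k).isSome = true ↔ k ∈ pvVocab := by
  simpa [pvVocab] using pv_lookup_mem k pvKeyBit

-- the mask loop succeeds exactly when every key is known, and then yields the OR fold
theorem pvMaskGo_some (l : List String) : ∀ (m : Nat), (∀ k ∈ l, k ∈ pvVocab) →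
    pvMaskGo m l = some (l.foldl (fun m k => m ||| pvBit k) m) := by
  induction l with
  | nil => intro m _; rfl
  | cons k rest ih =>
      intro m h
      have hk : k ∈ pvVocab := h k (by simp)
      have hs : (pvKeyBit.lookup k).isSome = true := (pv_lookup_vocab k).mpr hk
      cases hlk : pvKeyBit.lookup k with
      | none => simp [hlk] at hs
      | some b =>
          have hb : pvBit k = b := by simp [pvBit, hlk]
          simp only [pvMaskGo, hlk, List.foldl_cons, hb]
          exact ih (m ||| b) (fun x hx => h x (by simp [hx]))

theorem pvMaskGo_none (l : List String) : ∀ (m : Nat), (∃ k ∈ l, k ∉ pvVocab) →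
    pvMaskGo m l = none := by
  induction l with
  | nil => rintro m ⟨k, hk, -⟩; cases hk
  | cons x rest ih =>
      rintro m ⟨k, hk, hkv⟩
      cases h : pvKeyBit.lookup x with
      | none => simp [pvMaskGo, h]
      | some b =>
          rcases List.mem_cons.mp hk with rfl | hk'
          · exact absurd ((pv_lookup_vocab k).mp (by simp [h])) hkv
          · simp only [pvMaskGo, h]
            exact ih _ ⟨k, hk', hkv⟩

-- a bit of the OR fold is set iff some element's bit has it set
theorem pv_testBit_fold (l : List String) (m : Nat) (j : Nat) :
    (l.foldl (fun m k => m ||| pvBit k) m).testBit j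
      = (m.testBit j || l.any (fun k => (pvBit k).testBit j)) := by
  induction l generalizing m with
  | nil => simp
  | cons k rest ih =>
      simp [List.foldl_cons, ih, Nat.testBit_or, Bool.or_assoc]

-- masks are injective on lists of known keys, up to membership
theorem pv_mask_inj (s t : List String)
    (hs : ∀ k ∈ s, k ∈ pvVocab) (ht : ∀ k ∈ t, k ∈ pvVocab)
    (h : pvMaskOf s = pvMaskOf t) : ∀ x, x ∈ s ↔ x ∈ t := by
  have hbit : ∀ j, s.any (fun k => (pvBit k).testBit j) = t.any (fun k => (pvBit k).testBit j) := by
    intro j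
    have := congrArg (fun n => Nat.testBit n j) h
    simpa [pvMaskOf, pv_testBit_fold] using this
  have main : ∀ (u v : List String), (∀ k ∈ u, k ∈ pvVocab) → (∀ k ∈ v, k ∈ pvVocab) →
      (∀ j, u.any (fun k => (pvBit k).testBit j) = v.any (fun k => (pvBit k).testBit j)) →
      ∀ x, x ∈ u → x ∈ v := by
    intro u v hu hv hb x hx
    have hxv : x ∈ pvVocab := hu x hx
    have h1 : u.any (fun k => (pvBit k).testBit (Nat.log2 (pvBit x))) = true := by
      simp only [List.any_eq_true]
      exact ⟨x, hx, pv_bit_self x hxv⟩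
    rw [hb] at h1
    obtain ⟨y, hy, hty⟩ := List.any_eq_true.mp h1
    have := pv_bit_inj x hxv y (hv y hy) hty
    exact this ▸ hy
  intro x
  exact ⟨main s t hs ht hbit x, main t s ht hs (fun j => (hbit j).symm) x⟩

-- membership-equal lists have equal masks (the OR fold depends only on the member set)
theorem pv_mask_congr (s t : List String) (h : ∀ x, x ∈ s ↔ x ∈ t) :
    pvMaskOf s = pvMaskOf t := by
  apply Nat.eq_of_testBit_eq
  intro j
  simp only [pvMaskOf, pv_testBit_fold, Nat.zero_testBit, Bool.false_or]
  rw [Bool.eq_iff_iff]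
  simp only [List.any_eq_true]
  constructor
  · rintro ⟨k, hk, h1⟩; exact ⟨k, (h k).mp hk, h1⟩
  · rintro ⟨k, hk, h1⟩; exact ⟨k, (h k).mpr hk, h1⟩

-- each template's mask-loop value, evaluated
theorem pv_maskGo_templates : ∀ t ∈ pvKeysMatches, pvMaskGo 0 t = some (pvMaskOf t) := by decide

-- ===== VERDICT (by name: the statement is the Claim_ definition above) =====
theorem is_playerbasicdata_spec : Claim_equal_is_playerbasicdata := by
  intro row _
  unfold Spec_is_playerbasicdata is_playerbasicdata is_playerbasicdata_alt
  set keys := (PySem.Dict.ofList row).keys with hkeysdef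
  have hknd : keys.Nodup := by
    rw [hkeysdef, pv_keys_ofList]; exact PySem.Set.nodup_ofList _
  rw [pvTemplLoop_eq_any]
  by_cases hall : ∀ k ∈ keys, k ∈ pvVocab
  · -- every key known: both sides reduce to mask membership
    have hfold : pvMaskGo 0 keys = some (pvMaskOf keys) := by
      rw [pvMaskGo_some keys 0 hall]; simp only [pvMaskOf]
    simp only [hfold]
    rw [Bool.eq_iff_iff, List.any_eq_true, List.contains_iff_mem]
    have hmem : pvMaskOf keys ∈ pvTemplateMasks ↔
        ∃ t ∈ pvKeysMatches, pvMaskOf t = pvMaskOf keys := by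
      have h1 : pvMaskOf keys ∈ pvTemplateMasks ↔
          some (pvMaskOf keys) ∈ pvTemplateMasks.map some := by simp
      rw [h1, ← pv_masks_map, List.mem_map]
      constructor
      · rintro ⟨t, ht, he⟩
        refine ⟨t, ht, ?_⟩
        rw [pv_maskGo_templates t ht] at he
        exact Option.some.inj he
      · rintro ⟨t, ht, he⟩
        exact ⟨t, ht, by rw [pv_maskGo_templates t ht, he]⟩
    constructor
    · rintro ⟨t, htm, hmatch⟩
      exact hmem.mpr ⟨t, htm, (pv_mask_congr keys t
        ((pv_is_match_iff keys t hknd (pv_templates_nodup t htm)).mp hmatch)).symm⟩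
    · intro hm
      obtain ⟨t, htm, heq⟩ := hmem.mp hm
      exact ⟨t, htm, (pv_is_match_iff keys t hknd (pv_templates_nodup t htm)).mpr
        (pv_mask_inj keys t hall (pv_templates_vocab t htm) heq.symm)⟩
  · -- some key unknown: B bails out; A matches no template
    push_neg at hall
    obtain ⟨k, hk, hkv⟩ := hall
    simp only [pvMaskGo_none keys 0 ⟨k, hk, hkv⟩]
    rw [Bool.eq_iff_iff, List.any_eq_true]
    constructor
    · rintro ⟨t, htm, hmatch⟩
      have hmem := (pv_is_match_iff keys t hknd (pv_templates_nodup t htm)).mp hmatch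
      exact absurd (pv_templates_vocab t htm k ((hmem k).mp hk)) hkv
    · intro h; cases h
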